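-- pv_equiv track=rewrite | github.com/starfriend10/NLP-PubMiner | Simplified/[NLP-PubMiner] Step I Publication data_Pretreatment.py | lst_clean
-- ===== SOURCE A (Python) =====
-- def lst_clean(lst1):
--     lst2 = [w for w in lst1 if w]
--     lstpun = [',', '.', ' ', '/', "`", ';', ':', '<', '>', '=']
--     del1 = []
--     for w in lst2:
--         if any(i in list(w[0]) for i in lstpun):
--             del1.append(w)
--     lst3 = [w for w in lst2 if w not in del1] #all generated ngrams, to split it into two columns for a big dataset
--     lst3a = [w for w in lst3 if len(w.split(' ')) <= 2] #a new column includes ngrams = 1 or 2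
--     lst3b = [w for w in lst3 if len(w.split(' ')) > 2] #a new column includes ngrams = 3 or more
--     return lst3a, lst3b
-- ===== SOURCE B (Python) =====
-- def lst_clean(lst1):
--     pun = {',', '.', ' ', '/', '`', ';', ':', '<', '>', '='}
--     lst3a, lst3b = [], []
--     for w in lst1:
--         if not w or w[0] in pun:
--             continue
--         if len(w.split(' ')) <= 2:
--             lst3a.append(w)
--         else:
--             lst3b.append(w)
--     return lst3a, lst3b
-- ===== Notes on version B (the rewrite author's own statement) =====
-- stated objective: faster
-- what changed: Fuses A's four separate scans (empty filter, punctuation collection into del1, the quadratic 'w not in del1' membership filter, and two split-length filters) into a single pass over lst1 that categorizes each word directly into the two output lists using a punctuation set.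
import Mathlib
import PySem

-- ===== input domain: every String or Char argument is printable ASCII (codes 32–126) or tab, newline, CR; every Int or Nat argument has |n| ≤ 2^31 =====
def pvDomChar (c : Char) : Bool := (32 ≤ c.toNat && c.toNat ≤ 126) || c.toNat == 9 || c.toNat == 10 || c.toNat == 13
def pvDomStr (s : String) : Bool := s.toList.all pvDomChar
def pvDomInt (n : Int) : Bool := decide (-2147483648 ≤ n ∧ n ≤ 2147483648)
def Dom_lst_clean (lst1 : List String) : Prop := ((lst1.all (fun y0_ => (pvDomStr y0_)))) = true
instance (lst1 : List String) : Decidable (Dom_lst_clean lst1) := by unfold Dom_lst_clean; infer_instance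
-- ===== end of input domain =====

-- B fuses A's four separate list scans (empty-filter, punctuation collection, quadratic `not in del1` filter,
-- and two split-length filters) into one categorizing pass over lst1; objective: faster (quadratic scan removed).


-- ===== PORT A =====
-- lstpun, a list of one-character strings
def pvLstpun : List String := [",", ".", " ", "/", "`", ";", ":", "<", ">", "="]

-- `any(i in list(w[0]) for i in lstpun)`: list(w[0]) is the one-element list of w's first character
-- (as a string); the `none` branch is unreachable in A (lst2 holds no empty string).
def pvPunTestA (w : String) : Bool :=
  pvLstpun.any (fun i =>
    (match PySem.Str.pyGet? w 0 with
     | some c => [String.singleton c]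
     | none => []).contains i)

def lst_clean (lst1 : List String) : List String × List String :=
  let lst2 := lst1.filter (fun w => w ≠ "")
  let del1 := lst2.foldl (fun d w => if pvPunTestA w then d ++ [w] else d) []
  let lst3 := lst2.filter (fun w => ¬ (w ∈ del1))
  let lst3a := lst3.filter (fun w => (PySem.Chars.splitOn w.toList [' ']).length ≤ 2)
  let lst3b := lst3.filter (fun w => (PySem.Chars.splitOn w.toList [' ']).length > 2)
  (lst3a, lst3b)

-- ===== PORT B =====
-- the punctuation set, as characters
def pvPunChars : List Char := [',', '.', ' ', '/', '`', ';', ':', '<', '>', '=']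

-- single forward pass over lst1 with two accumulators (Source B's loop)
def lst_clean_alt (lst1 : List String) : List String × List String :=
  lst1.foldl (fun (acc : List String × List String) w =>
    match w.toList with
    | [] => acc
    | c :: _ =>
      if pvPunChars.contains c then acc
      else if (PySem.Chars.splitOn w.toList [' ']).length ≤ 2 then (acc.1 ++ [w], acc.2)
      else (acc.1, acc.2 ++ [w])) ([], [])

-- ===== PRECONDITION & SPEC =====
def Spec_lst_clean (lst1 : List String) (out : List String × List String) : Prop := out = lst_clean_alt lst1
instance (lst1 : List String) (out : List String × List String) : Decidable (Spec_lst_clean lst1 out) := by unfold Spec_lst_clean; infer_instance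

-- ===== CLAIM (what is proved, stated in full; the proofs are below) =====
def Claim_equal_lst_clean : Prop := ∀ (lst1 : List String), Dom_lst_clean lst1 → Spec_lst_clean lst1 (lst_clean lst1)

-- ===== LEMMAS AND PROOFS =====

-- the word-level predicates B classifies by
def pvKeep (w : String) : Bool :=
  match w.toList with
  | [] => false
  | c :: _ => ¬ pvPunChars.contains c

def pvSmall (w : String) : Bool := (PySem.Chars.splitOn w.toList [' ']).length ≤ 2

-- A's per-word punctuation test agrees with B's character-set test on nonempty words
lemma punTestA_eq (w : String) (c : Char) (rest : List Char) (h : w.toList = c :: rest) :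
    pvPunTestA w = pvPunChars.contains c := by
  have hg : PySem.Str.pyGet? w 0 = some c := by
    simp [h]
  have hx : ∀ t : String, (String.singleton c = t) ↔ [c] = t.toList := by
    intro t; rw [← String.toList_inj]; simp [String.singleton]
  simp only [pvPunTestA, hg]
  simp [pvLstpun, pvPunChars, hx, List.any_eq]

-- B's fold, with the accumulators generalized, computes the two filters
lemma alt_fold (l : List String) (a b : List String) :
    l.foldl (fun (acc : List String × List String) w =>
      match w.toList with
      | [] => acc
      | c :: _ =>
        if pvPunChars.contains c then acc
        else if (PySem.Chars.splitOn w.toList [' ']).length ≤ 2 then (acc.1 ++ [w], acc.2)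
        else (acc.1, acc.2 ++ [w])) (a, b)
    = (a ++ l.filter (fun w => pvKeep w && pvSmall w),
       b ++ l.filter (fun w => pvKeep w && !pvSmall w)) := by
  induction l generalizing a b with
  | nil => simp
  | cons w l ih =>
    rw [List.foldl_cons]
    cases hw : w.toList with
    | nil =>
      have hk : pvKeep w = false := by simp [pvKeep, hw]
      rw [ih]
      simp [hk]
    | cons c rest =>
      simp only [hw]
      by_cases hp : pvPunChars.contains c
      · have hk : pvKeep w = false := by simp [pvKeep, hw]; simpa using hp
        rw [if_pos hp, ih]
        simp [hk]
      · have hk : pvKeep w = true := by simp [pvKeep, hw]; simpa using hp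
        rw [if_neg hp]
        by_cases hs : (PySem.Chars.splitOn (c :: rest) [' ']).length ≤ 2
        · have hs' : pvSmall w = true := by simp [pvSmall, hw, hs]
          rw [if_pos hs, ih]
          simp [hk, hs']
        · have hs' : pvSmall w = false := by simp [pvSmall, hw, hs]
          rw [if_neg hs, ih]
          simp [hk, hs']

-- A's lst3 is the keep-filter of lst1
lemma lst3_eq (lst1 : List String) :
    ((lst1.filter (fun w => w ≠ "")).filter
      (fun w => ¬ (w ∈ (lst1.filter (fun w => w ≠ "")).foldl
          (fun d w => if pvPunTestA w then d ++ [w] else d) [])))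
    = lst1.filter pvKeep := by
  set lst2 := lst1.filter (fun w => w ≠ "") with hlst2
  have hdel : lst2.foldl (fun d w => if pvPunTestA w then d ++ [w] else d) []
      = lst2.filter pvPunTestA := by
    simpa using PySem.List.foldl_append_if_eq_filter (l := lst2) (p := pvPunTestA) (acc := [])
  rw [hdel]
  have h1 : lst2.filter (fun w => ¬ (w ∈ lst2.filter pvPunTestA))
      = lst2.filter (fun w => !pvPunTestA w) := by
    apply List.filter_congr
    intro w hw
    by_cases hp : pvPunTestA w
    · simp [hp, List.mem_filter, hw]
    · simp [hp, List.mem_filter]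
  rw [h1, hlst2, List.filter_filter]
  apply List.filter_congr
  intro w _
  cases hw : w.toList with
  | nil =>
    have : w = "" := by cases w; simp_all
    simp [this, pvKeep]
  | cons c rest =>
    have hne : w ≠ "" := by
      intro he; rw [he] at hw; simp at hw
    simp [punTestA_eq w c rest hw, pvKeep, hw, hne]

-- ===== VERDICT (by name: the statement is the Claim_ definition above) =====
theorem lst_clean_spec : Claim_equal_lst_clean := by
  intro lst1 _
  show lst_clean lst1 = lst_clean_alt lst1
  unfold lst_clean lst_clean_alt
  rw [alt_fold]
  simp only [List.nil_append]
  rw [lst3_eq, List.filter_filter, List.filter_filter]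
  have ha : lst1.filter (fun w => decide ((PySem.Chars.splitOn w.toList [' ']).length ≤ 2) && pvKeep w)
      = lst1.filter (fun w => pvKeep w && pvSmall w) :=
    List.filter_congr (fun w _ => by simp [pvSmall, Bool.and_comm])
  have hb : lst1.filter (fun w => decide ((PySem.Chars.splitOn w.toList [' ']).length > 2) && pvKeep w)
      = lst1.filter (fun w => pvKeep w && !pvSmall w) :=
    List.filter_congr (fun w _ => by
      by_cases hs : (PySem.Chars.splitOn w.toList [' ']).length ≤ 2
      · simp [pvSmall, hs]
      · simp [pvSmall, hs]
        omega)
  rw [ha, hb]
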